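-- pv_equiv track=rewrite | github.com/xxcocoymlxx/Study-Notes | CSC108/a1/a1_part2_ver1.py | get_sign_group
-- ===== SOURCE A (Python) =====
-- SIGN_GROUPS = '[ARI,LEO,SAG],[TAU,VIR,CAP],[GEM,LIB,AQU],[PIS,SCO,CAN]'
--
-- def get_sign_group(sign):
--     '''
--     (str) -> int
--
--     Given a three character string representing a star sign, return
--     which group (out of 0, 1, 2, or 3) this star sign belongs to.
--
--     Use the SIGN_GROUPS string (already defined for you above) to figure
--     out the group.
--     i.e. As given by this string '[ARI,LEO,SAG],[TAU,VIR,CAP],[GEM,LIB,AQU],[PIS,SCO,CAN]'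
--          the signs ARI, LEO and SAG are in group 0, the signs TAU, VIR, CAP are in group 1,
--          and so on.
--
--     >>> get_sign_group('ARI')
--     0
--
--     >>> get_sign_group('CAN')
--     3
--     '''
--     i = 0
--     group_number = 0
--     while i < len(SIGN_GROUPS):
--         group = ''
--         if SIGN_GROUPS[i] != ']':
--             i += 1
--         elif SIGN_GROUPS[i] == ']':
--             group = SIGN_GROUPS[0:i+1]
--             i += 1
--             if sign not in group:
--                 group_number += 1
--             else:
--                 return group_number
-- ===== SOURCE B (Python) =====
-- SIGN_GROUPS = '[ARI,LEO,SAG],[TAU,VIR,CAP],[GEM,LIB,AQU],[PIS,SCO,CAN]'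
--
-- def get_sign_group(sign):
--     for number, group in enumerate(SIGN_GROUPS.split('],[')):
--         if sign in group.strip('[]').split(','):
--             return number
--     return None
-- ===== Notes on version B (the rewrite author's own statement) =====
-- stated objective: simpler
-- what changed: Replaces A's character-by-character while loop with growing-prefix substring tests by parsing SIGN_GROUPS once with split/strip into the four lists of three-letter codes and returning the index of the list containing the sign.
-- intended difference: On strings that are substrings of SIGN_GROUPS without being one of the twelve sign codes (e.g. '', ',', '],[', 'RI,'), A returns the group number of the first prefix containing them — an accident of its substring test — while B returns None, the intended answer for a string that is not a star sign. — e.g. on get_sign_group(","): A returns some 0, B returns none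
import Mathlib
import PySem

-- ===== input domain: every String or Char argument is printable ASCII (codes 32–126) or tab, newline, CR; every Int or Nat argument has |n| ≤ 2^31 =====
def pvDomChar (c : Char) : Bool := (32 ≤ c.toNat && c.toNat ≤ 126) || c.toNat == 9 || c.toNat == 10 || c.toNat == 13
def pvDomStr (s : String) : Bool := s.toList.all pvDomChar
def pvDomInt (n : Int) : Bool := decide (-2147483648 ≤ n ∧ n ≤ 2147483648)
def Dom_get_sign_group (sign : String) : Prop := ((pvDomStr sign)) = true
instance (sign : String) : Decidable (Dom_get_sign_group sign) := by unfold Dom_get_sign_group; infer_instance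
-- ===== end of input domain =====

-- B parses SIGN_GROUPS into its four comma-separated code lists and looks the sign up by list
-- membership (simpler, idiomatic); it therefore answers None for fragments that are mere
-- substrings of SIGN_GROUPS without being star-sign codes, where A's growing-prefix substring
-- test returns a group number (see D_ below).

-- ===== PORT A =====
-- the module constant SIGN_GROUPS = '[ARI,LEO,SAG],[TAU,VIR,CAP],[GEM,LIB,AQU],[PIS,SCO,CAN]', as its char list
def pvSG : List Char := ['[', 'A', 'R', 'I', ',', 'L', 'E', 'O', ',', 'S', 'A', 'G', ']', ',', '[', 'T', 'A', 'U', ',', 'V', 'I', 'R', ',', 'C', 'A', 'P', ']', ',', '[', 'G', 'E', 'M', ',', 'L', 'I', 'B', ',', 'A', 'Q', 'U', ']', ',', '[', 'P', 'I', 'S', ',', 'S', 'C', 'O', ',', 'C', 'A', 'N', ']']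

-- A's while loop; fuel = len(SIGN_GROUPS) - i counts the remaining iterations (each one does i += 1),
-- so the fuel-0 branch is unreachable and the while-guard 'i < len(SIGN_GROUPS)' is kept literally.
-- SIGN_GROUPS[i] is getD (the guard keeps i in range, so it never defaults).
def pvALoop (sg : List Char) (fuel i : Nat) (group_number : Int) : Option Int :=
  match fuel with
  | 0 => none
  | fuel + 1 =>
    if i < pvSG.length then
      if pvSG.getD i ' ' ≠ ']' then
        pvALoop sg fuel (i + 1) group_number
      else
        -- group = SIGN_GROUPS[0:i+1]
        let group := PySem.Chars.slice pvSG (some 0) (some ((i : Int) + 1))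
        if ¬ PySem.Chars.isIn sg group then
          pvALoop sg fuel (i + 1) (group_number + 1)
        else
          some group_number
    else none   -- falling off the while loop: Python returns None

def get_sign_group (sign : String) : Option Int :=
  pvALoop sign.toList pvSG.length 0 0

-- ===== PORT B =====
-- for number, group in enumerate(SIGN_GROUPS.split('],[')): early-return loop as structural recursion
def pvBLoop (sg : List Char) : List (Int × List Char) → Option Int
  | [] => none   -- loop fell through: return None
  | (number, group) :: rest =>
    -- if sign in group.strip('[]').split(','): return number
    if (PySem.Chars.splitOn (PySem.Chars.stripChars group ['[', ']']) [',']).contains sg then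
      some number
    else
      pvBLoop sg rest

def get_sign_group_alt (sign : String) : Option Int :=
  pvBLoop sign.toList (PySem.List.enumerate (PySem.Chars.splitOn pvSG [']', ',', '[']))

-- ===== PRECONDITION & SPEC =====
-- the twelve star-sign codes that SIGN_GROUPS lists
def pvCodes : List String :=
  ["ARI", "LEO", "SAG", "TAU", "VIR", "CAP", "GEM", "LIB", "AQU", "PIS", "SCO", "CAN"]

-- On strings that are substrings of SIGN_GROUPS without being one of the twelve codes (e.g. '', ',', '],[', 'RI,'),
-- A returns the group number of the first prefix containing them, an accident of its substring test;
-- B returns None, the intended answer for a string that is not a star sign.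
def D_get_sign_group (sign : String) : Prop :=
  PySem.Str.isIn sign "[ARI,LEO,SAG],[TAU,VIR,CAP],[GEM,LIB,AQU],[PIS,SCO,CAN]" = true
    ∧ sign ∉ pvCodes
instance (sign : String) : Decidable (D_get_sign_group sign) := by unfold D_get_sign_group; infer_instance

def Spec_get_sign_group (sign : String) (out : Option Int) : Prop :=
  ¬ D_get_sign_group sign → out = get_sign_group_alt sign
instance (sign : String) (out : Option Int) : Decidable (Spec_get_sign_group sign out) := by unfold Spec_get_sign_group; infer_instance

def pvDiffWitness_get_sign_group : String := ","
def pvDiffWitnessOut_get_sign_group : (Option Int) × (Option Int) := (some 0, none)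

-- ===== CLAIM (what is proved, stated in full; the proofs are below) =====
def Claim_unchanged_get_sign_group : Prop :=
  ∀ (sign : String), Dom_get_sign_group sign → Spec_get_sign_group sign (get_sign_group sign)
def Claim_changed_get_sign_group : Prop :=
  Dom_get_sign_group (pvDiffWitness_get_sign_group) ∧ D_get_sign_group (pvDiffWitness_get_sign_group) ∧
  get_sign_group (pvDiffWitness_get_sign_group) = pvDiffWitnessOut_get_sign_group.1 ∧
  get_sign_group_alt (pvDiffWitness_get_sign_group) = pvDiffWitnessOut_get_sign_group.2 ∧
  pvDiffWitnessOut_get_sign_group.1 ≠ pvDiffWitnessOut_get_sign_group.2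
def Claim_exact_get_sign_group : Prop :=
  ∀ (sign : String), Dom_get_sign_group sign → D_get_sign_group sign →
    get_sign_group sign ≠ get_sign_group_alt sign

-- ===== LEMMAS AND PROOFS =====

lemma stepSkip (sg : List Char) (fuel i : Nat) (gn : Int) (h1 : i < 55) (h2 : pvSG.getD i ' ' ≠ ']') :
    pvALoop sg (fuel + 1) i gn = pvALoop sg fuel (i + 1) gn := by
  rw [pvALoop.eq_def]
  have hl : pvSG.length = 55 := rfl
  have h2' : pvSG[i]'(by omega) ≠ ']' := by
    rwa [List.getD_eq_getElem pvSG ' ' (by omega)] at h2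
  simp [hl, h1, h2']

lemma stepBracket (sg : List Char) (fuel i : Nat) (gn : Int) (h1 : i < 55) (h2 : pvSG.getD i ' ' = ']') :
    pvALoop sg (fuel + 1) i gn =
      if PySem.Chars.isIn sg (pvSG.take (i + 1)) then some gn
      else pvALoop sg fuel (i + 1) (gn + 1) := by
  rw [pvALoop.eq_def]
  have hl : pvSG.length = 55 := rfl
  have h2' : pvSG[i]'(by omega) = ']' := by
    rwa [List.getD_eq_getElem pvSG ' ' (by omega)] at h2
  have hsl : PySem.List.slice pvSG none (some ((i : Int) + 1)) = pvSG.take (i + 1) := by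
    rw [PySem.List.slice_to pvSG (b := (i : Int) + 1) (by positivity)]
    congr 1
  cases hIn : PySem.Chars.isIn sg (pvSG.take (i + 1)) <;> simp [hl, h1, h2', hsl, hIn]

-- unfolding A's loop on the 55-char constant leaves the four membership tests
lemma pvALoop_eval (sg : List Char) :
    pvALoop sg 55 0 0 =
      if PySem.Chars.isIn sg (pvSG.take 13) then some 0
      else if PySem.Chars.isIn sg (pvSG.take 27) then some 1
      else if PySem.Chars.isIn sg (pvSG.take 41) then some 2
      else if PySem.Chars.isIn sg (pvSG.take 55) then some 3
      else none := by
  have h0 : pvALoop sg 55 0 0 = pvALoop sg 54 1 0 := stepSkip sg 54 0 0 (by decide) (by decide)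
  have h1 : pvALoop sg 54 1 0 = pvALoop sg 53 2 0 := stepSkip sg 53 1 0 (by decide) (by decide)
  have h2 : pvALoop sg 53 2 0 = pvALoop sg 52 3 0 := stepSkip sg 52 2 0 (by decide) (by decide)
  have h3 : pvALoop sg 52 3 0 = pvALoop sg 51 4 0 := stepSkip sg 51 3 0 (by decide) (by decide)
  have h4 : pvALoop sg 51 4 0 = pvALoop sg 50 5 0 := stepSkip sg 50 4 0 (by decide) (by decide)
  have h5 : pvALoop sg 50 5 0 = pvALoop sg 49 6 0 := stepSkip sg 49 5 0 (by decide) (by decide)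
  have h6 : pvALoop sg 49 6 0 = pvALoop sg 48 7 0 := stepSkip sg 48 6 0 (by decide) (by decide)
  have h7 : pvALoop sg 48 7 0 = pvALoop sg 47 8 0 := stepSkip sg 47 7 0 (by decide) (by decide)
  have h8 : pvALoop sg 47 8 0 = pvALoop sg 46 9 0 := stepSkip sg 46 8 0 (by decide) (by decide)
  have h9 : pvALoop sg 46 9 0 = pvALoop sg 45 10 0 := stepSkip sg 45 9 0 (by decide) (by decide)
  have h10 : pvALoop sg 45 10 0 = pvALoop sg 44 11 0 := stepSkip sg 44 10 0 (by decide) (by decide)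
  have h11 : pvALoop sg 44 11 0 = pvALoop sg 43 12 0 := stepSkip sg 43 11 0 (by decide) (by decide)
  have h12 : pvALoop sg 43 12 0 = if PySem.Chars.isIn sg (pvSG.take 13) then some 0 else pvALoop sg 42 13 1 := by rw [stepBracket sg 42 12 0 (by decide) (by decide)]; norm_num
  have h13 : pvALoop sg 42 13 1 = pvALoop sg 41 14 1 := stepSkip sg 41 13 1 (by decide) (by decide)
  have h14 : pvALoop sg 41 14 1 = pvALoop sg 40 15 1 := stepSkip sg 40 14 1 (by decide) (by decide)
  have h15 : pvALoop sg 40 15 1 = pvALoop sg 39 16 1 := stepSkip sg 39 15 1 (by decide) (by decide)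
  have h16 : pvALoop sg 39 16 1 = pvALoop sg 38 17 1 := stepSkip sg 38 16 1 (by decide) (by decide)
  have h17 : pvALoop sg 38 17 1 = pvALoop sg 37 18 1 := stepSkip sg 37 17 1 (by decide) (by decide)
  have h18 : pvALoop sg 37 18 1 = pvALoop sg 36 19 1 := stepSkip sg 36 18 1 (by decide) (by decide)
  have h19 : pvALoop sg 36 19 1 = pvALoop sg 35 20 1 := stepSkip sg 35 19 1 (by decide) (by decide)
  have h20 : pvALoop sg 35 20 1 = pvALoop sg 34 21 1 := stepSkip sg 34 20 1 (by decide) (by decide)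
  have h21 : pvALoop sg 34 21 1 = pvALoop sg 33 22 1 := stepSkip sg 33 21 1 (by decide) (by decide)
  have h22 : pvALoop sg 33 22 1 = pvALoop sg 32 23 1 := stepSkip sg 32 22 1 (by decide) (by decide)
  have h23 : pvALoop sg 32 23 1 = pvALoop sg 31 24 1 := stepSkip sg 31 23 1 (by decide) (by decide)
  have h24 : pvALoop sg 31 24 1 = pvALoop sg 30 25 1 := stepSkip sg 30 24 1 (by decide) (by decide)
  have h25 : pvALoop sg 30 25 1 = pvALoop sg 29 26 1 := stepSkip sg 29 25 1 (by decide) (by decide)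
  have h26 : pvALoop sg 29 26 1 = if PySem.Chars.isIn sg (pvSG.take 27) then some 1 else pvALoop sg 28 27 2 := by rw [stepBracket sg 28 26 1 (by decide) (by decide)]; norm_num
  have h27 : pvALoop sg 28 27 2 = pvALoop sg 27 28 2 := stepSkip sg 27 27 2 (by decide) (by decide)
  have h28 : pvALoop sg 27 28 2 = pvALoop sg 26 29 2 := stepSkip sg 26 28 2 (by decide) (by decide)
  have h29 : pvALoop sg 26 29 2 = pvALoop sg 25 30 2 := stepSkip sg 25 29 2 (by decide) (by decide)
  have h30 : pvALoop sg 25 30 2 = pvALoop sg 24 31 2 := stepSkip sg 24 30 2 (by decide) (by decide)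
  have h31 : pvALoop sg 24 31 2 = pvALoop sg 23 32 2 := stepSkip sg 23 31 2 (by decide) (by decide)
  have h32 : pvALoop sg 23 32 2 = pvALoop sg 22 33 2 := stepSkip sg 22 32 2 (by decide) (by decide)
  have h33 : pvALoop sg 22 33 2 = pvALoop sg 21 34 2 := stepSkip sg 21 33 2 (by decide) (by decide)
  have h34 : pvALoop sg 21 34 2 = pvALoop sg 20 35 2 := stepSkip sg 20 34 2 (by decide) (by decide)
  have h35 : pvALoop sg 20 35 2 = pvALoop sg 19 36 2 := stepSkip sg 19 35 2 (by decide) (by decide)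
  have h36 : pvALoop sg 19 36 2 = pvALoop sg 18 37 2 := stepSkip sg 18 36 2 (by decide) (by decide)
  have h37 : pvALoop sg 18 37 2 = pvALoop sg 17 38 2 := stepSkip sg 17 37 2 (by decide) (by decide)
  have h38 : pvALoop sg 17 38 2 = pvALoop sg 16 39 2 := stepSkip sg 16 38 2 (by decide) (by decide)
  have h39 : pvALoop sg 16 39 2 = pvALoop sg 15 40 2 := stepSkip sg 15 39 2 (by decide) (by decide)
  have h40 : pvALoop sg 15 40 2 = if PySem.Chars.isIn sg (pvSG.take 41) then some 2 else pvALoop sg 14 41 3 := by rw [stepBracket sg 14 40 2 (by decide) (by decide)]; norm_num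
  have h41 : pvALoop sg 14 41 3 = pvALoop sg 13 42 3 := stepSkip sg 13 41 3 (by decide) (by decide)
  have h42 : pvALoop sg 13 42 3 = pvALoop sg 12 43 3 := stepSkip sg 12 42 3 (by decide) (by decide)
  have h43 : pvALoop sg 12 43 3 = pvALoop sg 11 44 3 := stepSkip sg 11 43 3 (by decide) (by decide)
  have h44 : pvALoop sg 11 44 3 = pvALoop sg 10 45 3 := stepSkip sg 10 44 3 (by decide) (by decide)
  have h45 : pvALoop sg 10 45 3 = pvALoop sg 9 46 3 := stepSkip sg 9 45 3 (by decide) (by decide)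
  have h46 : pvALoop sg 9 46 3 = pvALoop sg 8 47 3 := stepSkip sg 8 46 3 (by decide) (by decide)
  have h47 : pvALoop sg 8 47 3 = pvALoop sg 7 48 3 := stepSkip sg 7 47 3 (by decide) (by decide)
  have h48 : pvALoop sg 7 48 3 = pvALoop sg 6 49 3 := stepSkip sg 6 48 3 (by decide) (by decide)
  have h49 : pvALoop sg 6 49 3 = pvALoop sg 5 50 3 := stepSkip sg 5 49 3 (by decide) (by decide)
  have h50 : pvALoop sg 5 50 3 = pvALoop sg 4 51 3 := stepSkip sg 4 50 3 (by decide) (by decide)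
  have h51 : pvALoop sg 4 51 3 = pvALoop sg 3 52 3 := stepSkip sg 3 51 3 (by decide) (by decide)
  have h52 : pvALoop sg 3 52 3 = pvALoop sg 2 53 3 := stepSkip sg 2 52 3 (by decide) (by decide)
  have h53 : pvALoop sg 2 53 3 = pvALoop sg 1 54 3 := stepSkip sg 1 53 3 (by decide) (by decide)
  have h54 : pvALoop sg 1 54 3 = if PySem.Chars.isIn sg (pvSG.take 55) then some 3 else pvALoop sg 0 55 4 := by rw [stepBracket sg 0 54 3 (by decide) (by decide)]; norm_num
  have hend : pvALoop sg 0 55 4 = none := rfl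
  rw [h0, h1, h2, h3, h4, h5, h6, h7, h8, h9, h10, h11, h12, h13, h14, h15, h16, h17, h18, h19, h20, h21, h22, h23, h24, h25, h26, h27, h28, h29, h30, h31, h32, h33, h34, h35, h36, h37, h38, h39, h40, h41, h42, h43, h44, h45, h46, h47, h48, h49, h50, h51, h52, h53, h54, hend]

-- B's loop on the parsed constant reduces to four list-membership tests
lemma pvBLoop_eval (sg : List Char) :
    pvBLoop sg (PySem.List.enumerate (PySem.Chars.splitOn pvSG [']', ',', '['])) =
      if sg ∈ [['A','R','I'], ['L','E','O'], ['S','A','G']] then some 0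
      else if sg ∈ [['T','A','U'], ['V','I','R'], ['C','A','P']] then some 1
      else if sg ∈ [['G','E','M'], ['L','I','B'], ['A','Q','U']] then some 2
      else if sg ∈ [['P','I','S'], ['S','C','O'], ['C','A','N']] then some 3
      else none := by
  have he : PySem.List.enumerate (PySem.Chars.splitOn pvSG [']', ',', '[']) =
      [(0, "[ARI,LEO,SAG".toList), (1, "TAU,VIR,CAP".toList),
       (2, "GEM,LIB,AQU".toList), (3, "PIS,SCO,CAN]".toList)] := by decide
  have e0 : PySem.Chars.splitOn (PySem.Chars.stripChars "[ARI,LEO,SAG".toList ['[', ']']) [','] =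
      [['A','R','I'], ['L','E','O'], ['S','A','G']] := by decide
  have e1 : PySem.Chars.splitOn (PySem.Chars.stripChars "TAU,VIR,CAP".toList ['[', ']']) [','] =
      [['T','A','U'], ['V','I','R'], ['C','A','P']] := by decide
  have e2 : PySem.Chars.splitOn (PySem.Chars.stripChars "GEM,LIB,AQU".toList ['[', ']']) [','] =
      [['G','E','M'], ['L','I','B'], ['A','Q','U']] := by decide
  have e3 : PySem.Chars.splitOn (PySem.Chars.stripChars "PIS,SCO,CAN]".toList ['[', ']']) [','] =
      [['P','I','S'], ['S','C','O'], ['C','A','N']] := by decide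
  rw [he]
  simp only [pvBLoop, e0, e1, e2, e3, List.contains_iff_mem]

lemma pvNotInfix_take (sg : List Char) (k : Nat)
    (h : ¬ sg <:+: pvSG) : PySem.Chars.isIn sg (pvSG.take k) = false := by
  rw [PySem.Chars.isIn_eq_false_iff]
  intro hin
  exact h (hin.trans (List.take_prefix k pvSG).isInfix)

-- ===== VERDICT (by name: the statement is the Claim_ definition above) =====
theorem get_sign_group_spec : Claim_unchanged_get_sign_group := by
  intro sign _ hnD
  unfold get_sign_group get_sign_group_alt
  by_cases hmem : sign ∈ pvCodes
  · simp only [pvCodes, List.mem_cons, List.not_mem_nil, or_false] at hmem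
    rcases hmem with h | h | h | h | h | h | h | h | h | h | h | h <;>
      subst h <;> decide
  · have hni : ¬ PySem.Str.isIn sign "[ARI,LEO,SAG],[TAU,VIR,CAP],[GEM,LIB,AQU],[PIS,SCO,CAN]" = true := by
      intro hin
      exact hnD ⟨hin, hmem⟩
    have hinf : ¬ sign.toList <:+: pvSG := by
      intro hinf
      exact hni ((PySem.Str.isIn_iff_infix _ _).mpr hinf)
    rw [show pvSG.length = 55 from rfl, pvALoop_eval, pvBLoop_eval]
    have hA13 := pvNotInfix_take sign.toList 13 hinf
    have hA27 := pvNotInfix_take sign.toList 27 hinf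
    have hA41 := pvNotInfix_take sign.toList 41 hinf
    have hA55 := pvNotInfix_take sign.toList 55 hinf
    have hno : ∀ c ∈ pvCodes, sign ≠ c := fun c hc he => hmem (he ▸ hc)
    simp only [pvCodes, List.mem_cons, List.not_mem_nil, or_false, forall_eq_or_imp, forall_eq] at hno
    obtain ⟨n1, n2, n3, n4, n5, n6, n7, n8, n9, n10, n11, n12⟩ := hno
    have m1 : sign.toList ≠ "ARI".toList := fun h => n1 (String.toList_inj.mp h)
    have m2 : sign.toList ≠ "LEO".toList := fun h => n2 (String.toList_inj.mp h)
    have m3 : sign.toList ≠ "SAG".toList := fun h => n3 (String.toList_inj.mp h)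
    have m4 : sign.toList ≠ "TAU".toList := fun h => n4 (String.toList_inj.mp h)
    have m5 : sign.toList ≠ "VIR".toList := fun h => n5 (String.toList_inj.mp h)
    have m6 : sign.toList ≠ "CAP".toList := fun h => n6 (String.toList_inj.mp h)
    have m7 : sign.toList ≠ "GEM".toList := fun h => n7 (String.toList_inj.mp h)
    have m8 : sign.toList ≠ "LIB".toList := fun h => n8 (String.toList_inj.mp h)
    have m9 : sign.toList ≠ "AQU".toList := fun h => n9 (String.toList_inj.mp h)
    have m10 : sign.toList ≠ "PIS".toList := fun h => n10 (String.toList_inj.mp h)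
    have m11 : sign.toList ≠ "SCO".toList := fun h => n11 (String.toList_inj.mp h)
    have m12 : sign.toList ≠ "CAN".toList := fun h => n12 (String.toList_inj.mp h)
    simp only [show ("ARI".toList = ['A','R','I']) from rfl, show ("LEO".toList = ['L','E','O']) from rfl,
      show ("SAG".toList = ['S','A','G']) from rfl, show ("TAU".toList = ['T','A','U']) from rfl,
      show ("VIR".toList = ['V','I','R']) from rfl, show ("CAP".toList = ['C','A','P']) from rfl,
      show ("GEM".toList = ['G','E','M']) from rfl, show ("LIB".toList = ['L','I','B']) from rfl,
      show ("AQU".toList = ['A','Q','U']) from rfl, show ("PIS".toList = ['P','I','S']) from rfl,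
      show ("SCO".toList = ['S','C','O']) from rfl, show ("CAN".toList = ['C','A','N']) from rfl] at m1 m2 m3 m4 m5 m6 m7 m8 m9 m10 m11 m12
    simp [hA13, hA27, hA41, hA55, m1, m2, m3, m4, m5, m6, m7, m8, m9, m10, m11, m12]

theorem get_sign_group_changed : Claim_changed_get_sign_group := by
  unfold Claim_changed_get_sign_group; decide

theorem get_sign_group_tight : Claim_exact_get_sign_group := by
  intro sign _ hD
  obtain ⟨hin, hmem⟩ := hD
  have hinf : sign.toList <:+: pvSG := (PySem.Str.isIn_iff_infix _ _).mp hin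
  unfold get_sign_group get_sign_group_alt
  rw [show pvSG.length = 55 from rfl, pvALoop_eval, pvBLoop_eval]
  have hA55 : PySem.Chars.isIn sign.toList (pvSG.take 55) = true := by
    rw [PySem.Chars.isIn_iff_infix]
    rwa [show pvSG.take 55 = pvSG from rfl]
  have hno : ∀ c ∈ pvCodes, sign ≠ c := fun c hc he => hmem (he ▸ hc)
  simp only [pvCodes, List.mem_cons, List.not_mem_nil, or_false, forall_eq_or_imp, forall_eq] at hno
  obtain ⟨n1, n2, n3, n4, n5, n6, n7, n8, n9, n10, n11, n12⟩ := hno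
  have m1 : sign.toList ≠ "ARI".toList := fun h => n1 (String.toList_inj.mp h)
  have m2 : sign.toList ≠ "LEO".toList := fun h => n2 (String.toList_inj.mp h)
  have m3 : sign.toList ≠ "SAG".toList := fun h => n3 (String.toList_inj.mp h)
  have m4 : sign.toList ≠ "TAU".toList := fun h => n4 (String.toList_inj.mp h)
  have m5 : sign.toList ≠ "VIR".toList := fun h => n5 (String.toList_inj.mp h)
  have m6 : sign.toList ≠ "CAP".toList := fun h => n6 (String.toList_inj.mp h)
  have m7 : sign.toList ≠ "GEM".toList := fun h => n7 (String.toList_inj.mp h)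
  have m8 : sign.toList ≠ "LIB".toList := fun h => n8 (String.toList_inj.mp h)
  have m9 : sign.toList ≠ "AQU".toList := fun h => n9 (String.toList_inj.mp h)
  have m10 : sign.toList ≠ "PIS".toList := fun h => n10 (String.toList_inj.mp h)
  have m11 : sign.toList ≠ "SCO".toList := fun h => n11 (String.toList_inj.mp h)
  have m12 : sign.toList ≠ "CAN".toList := fun h => n12 (String.toList_inj.mp h)
  split_ifs <;> simp_all
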